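-- pv_equiv track=rewrite | github.com/xdudaj02/Bioinformatics | lab_5/dotplots.py | extended_dotplot
-- ===== SOURCE A (Python) =====
-- def create_mat(nrows, ncols):
--     mat = []
--     for i in range(nrows):
--         mat.append([])
--         for _ in range(ncols):
--             mat[i].append(0)
--     return mat
--
-- def extended_dotplot(seq1, seq2, window, stringency):
--     mat = create_mat(len(seq1), len(seq2))
--     start = int(window / 2)
--     for i in range(start, len(seq1) - start):
--         for j in range(start, len(seq2) - start):
--             matches = 0
--             l = j - start
--             for k in range(i - start, i + start + 1):
--                 if seq1[k] == seq2[l]: matches += 1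
--                 l += 1
--                 if matches >= stringency: mat[i][j] = 1
--     return mat
-- ===== SOURCE B (Python) =====
-- def extended_dotplot(seq1, seq2, window, stringency):
--     # Per-diagonal sliding-window count instead of recounting the window for every cell.
--     n, m = len(seq1), len(seq2)
--     mat = [[0] * m for _ in range(n)]
--     start = int(window / 2)
--     if start < 0:
--         return mat
--     w = 2 * start + 1
--     for d in range(-(n - 1), m):
--         i0 = max(0, -d)
--         j0 = i0 + d
--         length = min(n - i0, m - j0)
--         s = 0
--         for t in range(length):
--             s += seq1[i0 + t] == seq2[j0 + t]
--             if t >= w: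
--                 s -= seq1[i0 + t - w] == seq2[j0 + t - w]
--             if t >= w - 1 and s >= stringency:
--                 mat[i0 + t - start][j0 + t - start] = 1
--     return mat
-- ===== Notes on version B (the rewrite author's own statement) =====
-- stated objective: faster
-- what changed: B computes each diagonal's match indicators once with a sliding-window sum (add the entering cell, drop the leaving one), instead of A's recounting the whole window for every matrix cell.
import Mathlib
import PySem

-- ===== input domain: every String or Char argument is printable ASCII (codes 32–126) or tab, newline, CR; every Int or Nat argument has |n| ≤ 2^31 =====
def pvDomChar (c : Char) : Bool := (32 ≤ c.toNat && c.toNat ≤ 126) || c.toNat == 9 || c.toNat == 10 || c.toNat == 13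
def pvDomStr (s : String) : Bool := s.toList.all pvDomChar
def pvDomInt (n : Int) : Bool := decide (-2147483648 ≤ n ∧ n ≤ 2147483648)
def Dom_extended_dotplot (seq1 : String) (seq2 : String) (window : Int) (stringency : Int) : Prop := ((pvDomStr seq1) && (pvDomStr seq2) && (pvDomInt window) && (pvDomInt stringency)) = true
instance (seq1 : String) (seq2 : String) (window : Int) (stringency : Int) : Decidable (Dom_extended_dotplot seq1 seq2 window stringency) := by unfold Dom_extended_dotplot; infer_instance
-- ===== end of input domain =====

-- B replaces A's per-cell window recount by one sliding-window sum per diagonal (objective: faster).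

-- ===== PORT A =====
-- literal transliteration of A; seq indexing is pyGetD (exact here: every executed
-- index is in range), list item assignment is pySetD.
def create_mat (nrows : Int) (ncols : Int) : List (List Int) :=
  (PySem.List.pyRange 0 nrows 1).foldl (fun mat i =>
    let mat := mat ++ [([] : List Int)]
    (PySem.List.pyRange 0 ncols 1).foldl (fun mat _ =>
      PySem.List.pySetD mat i (PySem.List.pyGetD mat i [] ++ [0])) mat) []

def extended_dotplot (seq1 : String) (seq2 : String) (window : Int) (stringency : Int) : List (List Int) :=
  let s1 := seq1.toList
  let s2 := seq2.toList
  let mat := create_mat (s1.length : Int) (s2.length : Int)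
  let start := PySem.Int.truncdiv window 2
  (PySem.List.pyRange start ((s1.length : Int) - start) 1).foldl (fun mat i =>
    (PySem.List.pyRange start ((s2.length : Int) - start) 1).foldl (fun mat j =>
      ((PySem.List.pyRange (i - start) (i + start + 1) 1).foldl
        (fun (p : Int × Int × List (List Int)) k =>
          let ms := if PySem.List.pyGetD s1 k ' ' = PySem.List.pyGetD s2 p.2.1 ' ' then p.1 + 1 else p.1
          let l := p.2.1 + 1
          let mat := if stringency ≤ ms then
              PySem.List.pySetD p.2.2 i (PySem.List.pySetD (PySem.List.pyGetD p.2.2 i []) j 1)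
            else p.2.2
          (ms, l, mat)) (0, j - start, mat)).2.2) mat) mat

-- ===== PORT B =====
-- literal transliteration of Source B (per-diagonal sliding window).
def extended_dotplot_alt (seq1 : String) (seq2 : String) (window : Int) (stringency : Int) : List (List Int) :=
  let s1 := seq1.toList
  let s2 := seq2.toList
  let n : Int := s1.length
  let m : Int := s2.length
  let mat : List (List Int) := (List.range s1.length).map (fun _ => List.replicate s2.length (0 : Int))
  let start := PySem.Int.truncdiv window 2
  if start < 0 then mat else
  let w := 2 * start + 1
  (PySem.List.pyRange (-(n - 1)) m 1).foldl (fun mat d =>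
    let i0 : Int := max 0 (-d)
    let j0 : Int := i0 + d
    let len : Int := min (n - i0) (m - j0)
    ((PySem.List.pyRange 0 len 1).foldl (fun (p : Int × List (List Int)) t =>
      let s := p.1 + (if PySem.List.pyGetD s1 (i0 + t) ' ' = PySem.List.pyGetD s2 (j0 + t) ' ' then 1 else 0)
      let s := if w ≤ t then
          s - (if PySem.List.pyGetD s1 (i0 + t - w) ' ' = PySem.List.pyGetD s2 (j0 + t - w) ' ' then 1 else 0)
        else s
      let mat := if w - 1 ≤ t ∧ stringency ≤ s then
          PySem.List.pySetD p.2 (i0 + t - start)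
            (PySem.List.pySetD (PySem.List.pyGetD p.2 (i0 + t - start) []) (j0 + t - start) 1)
        else p.2
      (s, mat)) (0, mat)).2) mat

-- ===== PRECONDITION & SPEC =====
def Spec_extended_dotplot (seq1 : String) (seq2 : String) (window : Int) (stringency : Int) (out : List (List Int)) : Prop := out = extended_dotplot_alt seq1 seq2 window stringency
instance (seq1 : String) (seq2 : String) (window : Int) (stringency : Int) (out : List (List Int)) : Decidable (Spec_extended_dotplot seq1 seq2 window stringency out) := by unfold Spec_extended_dotplot; infer_instance

-- ===== CLAIM (what is proved, stated in full; the proofs are below) =====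
def Claim_equal_extended_dotplot : Prop := ∀ (seq1 : String) (seq2 : String) (window : Int) (stringency : Int), Dom_extended_dotplot seq1 seq2 window stringency → Spec_extended_dotplot seq1 seq2 window stringency (extended_dotplot seq1 seq2 window stringency)

-- ===== LEMMAS AND PROOFS =====

-- Writing a 1 into cell (p,q) of a matrix (total List form of `mat[i][j] = 1` for
-- nonnegative indices).
def pvMarkN (mat : List (List Int)) (p q : Nat) : List (List Int) :=
  mat.set p ((mat.getD p []).set q 1)

def pvMarks (mat : List (List Int)) (ps : List (Nat × Nat)) : List (List Int) :=
  ps.foldl (fun m pr => pvMarkN m pr.1 pr.2) mat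

def pvEnt (mat : List (List Int)) (p q : Nat) : Int := (mat.getD p []).getD q 0

def pvShape (mat : List (List Int)) (n m : Nat) : Prop :=
  mat.length = n ∧ ∀ row ∈ mat, row.length = m

def pvZero (n m : Nat) : List (List Int) :=
  (List.range n).map (fun _ => List.replicate m (0 : Int))

def pvDelta (s1 s2 : List Char) (k l : Int) : Int :=
  if PySem.List.pyGetD s1 k ' ' = PySem.List.pyGetD s2 l ' ' then 1 else 0

def pvCnt (s1 s2 : List Char) (a l0 : Int) (len : Nat) : Int :=
  ((List.range len).map (fun (t : Nat) => pvDelta s1 s2 (a + (t : Int)) (l0 + (t : Int)))).sum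

def pvCondA (s1 s2 : List Char) (strin start i j : Int) : Bool :=
  decide (0 < (2*start+1).toNat ∧
    strin ≤ pvCnt s1 s2 (i - start) (j - start) (2*start+1).toNat)

def pvPsA (s1 s2 : List Char) (strin start : Int) : List (Nat × Nat) :=
  (PySem.List.pyRange start ((s1.length : Int) - start) 1).flatMap (fun i =>
    ((PySem.List.pyRange start ((s2.length : Int) - start) 1).filter
      (fun j => pvCondA s1 s2 strin start i j)).map (fun j => (i.toNat, j.toNat)))

def pvSd (s1 s2 : List Char) (i0 j0 w x : Int) : Int :=
  ((PySem.List.pyRange (max 0 (x - w)) x 1).map (fun u => pvDelta s1 s2 (i0 + u) (j0 + u))).sum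

def pvCondB (s1 s2 : List Char) (strin start i0 j0 t : Int) : Bool :=
  decide (2*start ≤ t ∧ strin ≤ pvSd s1 s2 i0 j0 (2*start+1) (t+1))

def pvPsB (s1 s2 : List Char) (strin start : Int) : List (Nat × Nat) :=
  (PySem.List.pyRange (-((s1.length : Int) - 1)) (s2.length : Int) 1).flatMap (fun d =>
    ((PySem.List.pyRange 0
        (((min ((s1.length : Int) - max 0 (-d)) ((s2.length : Int) - (max 0 (-d) + d))).toNat : Nat) : Int) 1).filter
      (fun t => pvCondB s1 s2 strin start (max 0 (-d)) (max 0 (-d) + d) t)).map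
      (fun t => ((max 0 (-d) + t - start).toNat, (max 0 (-d) + d + t - start).toNat)))

lemma pvMarkN_idem (mat : List (List Int)) (p q : Nat) :
    pvMarkN (pvMarkN mat p q) p q = pvMarkN mat p q := by
  unfold pvMarkN
  by_cases hp : p < mat.length
  · have h1 : (mat.set p ((mat.getD p []).set q 1)).getD p []
        = (mat.getD p []).set q 1 := by
      rw [List.getD_eq_getElem?_getD, List.getElem?_set_self (by simpa using hp)]
      rfl
    rw [h1, List.set_set, List.set_set]
  · have h2 : mat.set p ((mat.getD p []).set q 1) = mat :=
      List.set_eq_of_length_le (by omega)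
    rw [h2]
    exact h2

lemma pyMark_eq (mat : List (List Int)) (i j : Int) (hi : 0 ≤ i) (hj : 0 ≤ j) :
    PySem.List.pySetD mat i (PySem.List.pySetD (PySem.List.pyGetD mat i []) j 1)
      = pvMarkN mat i.toNat j.toNat := by
  rw [PySem.List.pyGetD_of_nonneg _ _ hi, PySem.List.pySetD_of_nonneg _ _ hj,
    PySem.List.pySetD_of_nonneg _ _ hi]
  rfl

lemma pvCnt_nonneg (s1 s2 : List Char) (a l0 : Int) (len : Nat) :
    0 ≤ pvCnt s1 s2 a l0 len := by
  unfold pvCnt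
  apply List.sum_nonneg
  intro x hx
  simp only [List.mem_map] at hx
  obtain ⟨t, _, rfl⟩ := hx
  unfold pvDelta; split <;> omega

lemma pvCnt_succ (s1 s2 : List Char) (a l0 : Int) (len : Nat) :
    pvCnt s1 s2 a l0 (len+1) = pvDelta s1 s2 a l0 + pvCnt s1 s2 (a+1) (l0+1) len := by
  unfold pvCnt
  rw [List.range_succ_eq_map, List.map_cons, List.sum_cons, List.map_map]
  congr 1
  · norm_num
  · apply congrArg List.sum
    apply List.map_congr_left
    intro t _
    simp only [Function.comp_apply]
    congr 1 <;> push_cast <;> ring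

lemma pv_foldl_cmark {α : Type} (C : α → Bool) (I J : α → Nat) :
    ∀ (l : List α) (mat : List (List Int)),
      l.foldl (fun m x => if C x then pvMarkN m (I x) (J x) else m) mat
        = pvMarks mat ((l.filter C).map (fun x => (I x, J x))) := by
  intro l
  induction l with
  | nil => intro mat; rfl
  | cons hd tl ih =>
    intro mat
    by_cases h : C hd
    · simp [List.filter_cons, h, pvMarks, List.foldl_cons, ih]
    · simp [List.filter_cons, h, List.foldl_cons, ih]

lemma pv_foldl_marks {α : Type} (g : α → List (Nat × Nat)) :
    ∀ (l : List α) (mat : List (List Int)),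
      l.foldl (fun m x => pvMarks m (g x)) mat = pvMarks mat (l.flatMap g) := by
  intro l
  induction l with
  | nil => intro mat; rfl
  | cons hd tl ih =>
    intro mat
    rw [List.foldl_cons, ih]
    unfold pvMarks
    rw [List.flatMap_cons, List.foldl_append]

lemma pv_shape_zero (n m : Nat) : pvShape (pvZero n m) n m := by
  constructor
  · simp [pvZero]
  · intro row hr
    simp only [pvZero, List.mem_map] at hr
    obtain ⟨_, _, rfl⟩ := hr
    simp

lemma pv_shape_markN (mat : List (List Int)) (n m i j : Nat)
    (h : pvShape mat n m) (hi : i < n) : pvShape (pvMarkN mat i j) n m := by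
  obtain ⟨hlen, hrow⟩ := h
  constructor
  · simp [pvMarkN, hlen]
  · intro row hr
    rcases List.mem_or_eq_of_mem_set hr with h1 | h1
    · exact hrow _ h1
    · subst h1
      rw [List.length_set]
      rw [List.getD_eq_getElem _ _ (by omega)]
      exact hrow _ (List.getElem_mem _)

lemma pv_ent_markN (mat : List (List Int)) (n m i j p q : Nat)
    (h : pvShape mat n m) (hi : i < n) (hj : j < m) (hp : p < n) (hq : q < m) :
    pvEnt (pvMarkN mat i j) p q = if p = i ∧ q = j then 1 else pvEnt mat p q := by
  obtain ⟨hlen, hrow⟩ := h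
  have hp' : p < mat.length := by omega
  have hi' : i < mat.length := by omega
  have hrl : (mat[i]?.getD []).length = m := by
    rw [List.getElem?_eq_getElem hi']
    exact hrow _ (List.getElem_mem _)
  unfold pvEnt pvMarkN
  simp only [List.getD_eq_getElem?_getD, List.getElem?_set]
  by_cases hpi : i = p
  · subst hpi
    simp only [if_pos rfl, if_pos hi', Option.getD_some, List.getElem?_set]
    by_cases hqj : j = q
    · subst hqj
      simp [List.getElem?_set, hrl, hj]
    · have h' : ¬ q = j := fun hh => hqj hh.symm
      simp [List.getElem?_set, hqj, h']
  · rw [if_neg hpi]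
    have hne : ¬ (p = i ∧ q = j) := fun hh => hpi hh.1.symm
    rw [if_neg hne]

lemma pv_ent_marks (n m : Nat) :
    ∀ (ps : List (Nat × Nat)) (mat : List (List Int)), pvShape mat n m →
      (∀ pr ∈ ps, pr.1 < n ∧ pr.2 < m) →
      pvShape (pvMarks mat ps) n m ∧
        ∀ p q, p < n → q < m →
          pvEnt (pvMarks mat ps) p q = if (p, q) ∈ ps then 1 else pvEnt mat p q := by
  intro ps
  induction ps with
  | nil => intro mat hsh _; exact ⟨hsh, by intro p q _ _; simp [pvMarks]⟩
  | cons hd tl ih =>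
    intro mat hsh hb
    have hhd := hb hd (List.mem_cons_self)
    have hsh1 : pvShape (pvMarkN mat hd.1 hd.2) n m := pv_shape_markN _ _ _ _ _ hsh hhd.1
    have hb' : ∀ pr ∈ tl, pr.1 < n ∧ pr.2 < m := fun pr hpr => hb pr (List.mem_cons_of_mem _ hpr)
    obtain ⟨ih1, ih2⟩ := ih (pvMarkN mat hd.1 hd.2) hsh1 hb'
    refine ⟨ih1, ?_⟩
    intro p q hp hq
    have : pvMarks mat (hd :: tl) = pvMarks (pvMarkN mat hd.1 hd.2) tl := rfl
    rw [this, ih2 p q hp hq, pv_ent_markN mat n m hd.1 hd.2 p q hsh hhd.1 hhd.2 hp hq]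
    by_cases h1 : (p, q) ∈ tl
    · simp [h1]
    · by_cases h2 : p = hd.1 ∧ q = hd.2
      · obtain ⟨rfl, rfl⟩ := h2
        have hmem : (hd.1, hd.2) ∈ hd :: tl := by simp
        simp [h1, hmem]
      · have : (p, q) ∉ hd :: tl := by
          simp only [List.mem_cons, not_or]
          refine ⟨?_, h1⟩
          intro hh
          exact h2 ⟨congrArg Prod.fst hh, congrArg Prod.snd hh⟩
        simp [h1, h2, this]

lemma pv_matrix_ext (A B : List (List Int)) (n m : Nat)
    (hA : pvShape A n m) (hB : pvShape B n m)
    (h : ∀ p q, p < n → q < m → pvEnt A p q = pvEnt B p q) : A = B := by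
  apply List.ext_getElem (by rw [hA.1, hB.1])
  intro p h1 h2
  have hpl : p < n := by rw [← hA.1]; exact h1
  have hAr : A[p].length = m := hA.2 _ (List.getElem_mem _)
  have hBr : B[p].length = m := hB.2 _ (List.getElem_mem _)
  apply List.ext_getElem (by rw [hAr, hBr])
  intro q hq1 hq2
  have hql : q < m := by rw [← hAr]; exact hq1
  have := h p q hpl hql
  unfold pvEnt at this
  rwa [List.getD_eq_getElem _ _ h1, List.getD_eq_getElem _ _ h2,
    List.getD_eq_getElem _ _ hq1, List.getD_eq_getElem _ _ hq2] at this

lemma psA_nil_of_neg (s1 s2 : List Char) (strin start : Int) (hs : start < 0) :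
    pvPsA s1 s2 strin start = [] := by
  have hc : ∀ i j, pvCondA s1 s2 strin start i j = false := by
    intro i j
    simp only [pvCondA, decide_eq_false_iff_not, not_and]
    intro h
    omega
  simp [pvPsA, hc]

lemma kloopA_gen (s1 s2 : List Char) (strin start i j : Int) :
    ∀ (len : Nat) (a m0 l0 : Int) (mat : List (List Int)), (0 < len → 0 ≤ i ∧ 0 ≤ j) →
    ((PySem.List.pyRange a (a + (len : Int)) 1).foldl
      (fun (p : Int × Int × List (List Int)) k =>
        let ms := if PySem.List.pyGetD s1 k ' ' = PySem.List.pyGetD s2 p.2.1 ' ' then p.1 + 1 else p.1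
        let l := p.2.1 + 1
        let mat := if strin ≤ ms then
            PySem.List.pySetD p.2.2 i (PySem.List.pySetD (PySem.List.pyGetD p.2.2 i []) j 1)
          else p.2.2
        (ms, l, mat)) (m0, l0, mat))
      = (m0 + pvCnt s1 s2 a l0 len, l0 + (len : Int),
         if 0 < len ∧ strin ≤ m0 + pvCnt s1 s2 a l0 len then pvMarkN mat i.toNat j.toNat else mat) := by
  intro len
  induction len with
  | zero =>
    intro a m0 l0 mat _
    rw [show a + ((0:Nat):Int) = a by simp, PySem.List.pyRange_one_eq_nil le_rfl]
    simp [pvCnt]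
  | succ len ih =>
    intro a m0 l0 mat hij
    obtain ⟨hi, hj⟩ := hij (Nat.succ_pos len)
    rw [show a + ((len+1 : Nat) : Int) = (a + 1) + (len : Int) by push_cast; ring]
    rw [PySem.List.pyRange_one_cons (by omega : a < a + 1 + (len : Int))]
    rw [List.foldl_cons]
    dsimp only
    rw [pyMark_eq mat i j hi hj]
    rw [ih (a+1) _ (l0+1) _ (fun _ => ⟨hi, hj⟩)]
    have hms : (if PySem.List.pyGetD s1 a ' ' = PySem.List.pyGetD s2 l0 ' ' then m0 + 1 else m0)
        = m0 + pvDelta s1 s2 a l0 := by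
      unfold pvDelta; split <;> ring
    rw [hms]
    have hcnt : m0 + pvCnt s1 s2 a l0 (len+1)
        = (m0 + pvDelta s1 s2 a l0) + pvCnt s1 s2 (a+1) (l0+1) len := by
      rw [pvCnt_succ]; ring
    simp only [Prod.mk.injEq]
    refine ⟨by rw [hcnt], by push_cast; ring, ?_⟩
    rw [hcnt]
    have hnn := pvCnt_nonneg s1 s2 (a+1) (l0+1) len
    by_cases hC : strin ≤ m0 + pvDelta s1 s2 a l0 + pvCnt s1 s2 (a + 1) (l0 + 1) len
    · conv_rhs => rw [if_pos (show (0 < len + 1 ∧ strin ≤ m0 + pvDelta s1 s2 a l0 + pvCnt s1 s2 (a + 1) (l0 + 1) len) from ⟨by omega, hC⟩)]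
      rcases Nat.eq_zero_or_pos len with hl | hl
      -- len = 0 : the rest of the loop is empty, the first step already decided
      · subst hl
        have hzz : pvCnt s1 s2 (a + 1) (l0 + 1) 0 = 0 := by simp [pvCnt]
        have h1 : strin ≤ m0 + pvDelta s1 s2 a l0 := by linarith
        rw [if_pos h1]
        rw [if_neg (show ¬ ((0:Nat) < 0 ∧ strin ≤ m0 + pvDelta s1 s2 a l0 + pvCnt s1 s2 (a + 1) (l0 + 1) 0) from fun hh => absurd hh.1 (by omega))]
      · conv_lhs => rw [if_pos (show (0 < len ∧ strin ≤ m0 + pvDelta s1 s2 a l0 + pvCnt s1 s2 (a + 1) (l0 + 1) len) from ⟨hl, hC⟩)]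
        by_cases h1 : strin ≤ m0 + pvDelta s1 s2 a l0
        · rw [if_pos h1]
          exact pvMarkN_idem _ _ _
        · rw [if_neg h1]
    · have h1 : ¬ strin ≤ m0 + pvDelta s1 s2 a l0 := by intro hh; exact hC (by linarith)
      rw [if_neg h1]
      rw [if_neg (show ¬ (0 < len ∧ strin ≤ m0 + pvDelta s1 s2 a l0 + pvCnt s1 s2 (a + 1) (l0 + 1) len) from fun hh => hC hh.2)]
      rw [if_neg (show ¬ (0 < len + 1 ∧ strin ≤ m0 + pvDelta s1 s2 a l0 + pvCnt s1 s2 (a + 1) (l0 + 1) len) from fun hh => hC hh.2)]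

lemma kloopA (s1 s2 : List Char) (strin start i j : Int) (mat : List (List Int))
    (hij : 0 ≤ start → 0 ≤ i ∧ 0 ≤ j) :
    ((PySem.List.pyRange (i - start) (i + start + 1) 1).foldl
      (fun (p : Int × Int × List (List Int)) k =>
        let ms := if PySem.List.pyGetD s1 k ' ' = PySem.List.pyGetD s2 p.2.1 ' ' then p.1 + 1 else p.1
        let l := p.2.1 + 1
        let mat := if strin ≤ ms then
            PySem.List.pySetD p.2.2 i (PySem.List.pySetD (PySem.List.pyGetD p.2.2 i []) j 1)
          else p.2.2
        (ms, l, mat)) (0, j - start, mat)).2.2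
      = if pvCondA s1 s2 strin start i j then pvMarkN mat i.toNat j.toNat else mat := by
  rcases lt_or_ge start 0 with hneg | hs
  · rw [PySem.List.pyRange_one_eq_nil (by omega : i + start + 1 ≤ i - start)]
    simp only [List.foldl_nil]
    have hc : pvCondA s1 s2 strin start i j = false := by
      simp only [pvCondA, decide_eq_false_iff_not, not_and]
      intro h
      omega
    rw [hc]
    simp
  · obtain ⟨hi, hj⟩ := hij hs
    rw [show i + start + 1 = (i - start) + (((2*start+1).toNat : Nat) : Int) by
      rw [Int.toNat_of_nonneg (by omega)]; ring]
    rw [kloopA_gen s1 s2 strin start i j (2*start+1).toNat (i-start) 0 (j-start) mat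
      (fun _ => ⟨hi, hj⟩)]
    simp only [pvCondA, zero_add, decide_eq_true_eq]

lemma pv_row_fill (c : Nat) :
    ∀ (rows : List (List Int)) (r : List Int) (i : Int), i = (rows.length : Int) →
    ((PySem.List.pyRange 0 (c : Int) 1).foldl
      (fun mat _ => PySem.List.pySetD mat i (PySem.List.pyGetD mat i [] ++ [0])) (rows ++ [r]))
      = rows ++ [r ++ List.replicate c 0] := by
  induction c with
  | zero =>
    intro rows r i hi
    rw [show ((0:Nat):Int) = 0 by simp, PySem.List.pyRange_one_eq_nil le_rfl]
    simp
  | succ c ih =>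
    intro rows r i hi
    rw [show ((c+1 : Nat) : Int) = (c : Int) + 1 by push_cast; ring]
    rw [PySem.List.pyRange_one_succ_right (by positivity), List.foldl_append]
    rw [ih rows r i hi]
    simp only [List.foldl_cons, List.foldl_nil]
    subst hi
    rw [PySem.List.pyGetD_of_nonneg _ _ (by positivity), PySem.List.pySetD_of_nonneg _ _ (by positivity)]
    rw [Int.toNat_natCast]
    have hg : (rows ++ [r ++ List.replicate c 0]).getD rows.length [] = r ++ List.replicate c 0 := by
      rw [List.getD_eq_getElem?_getD, List.getElem?_concat_length]
      rfl
    rw [hg, List.set_append_right _ _ le_rfl]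
    simp [List.replicate_succ']

lemma create_mat_eq (n m : Nat) : create_mat (n : Int) (m : Int) = pvZero n m := by
  induction n with
  | zero =>
    simp [create_mat, pvZero, PySem.List.pyRange_one_eq_nil]
  | succ n ih =>
    unfold create_mat
    rw [show ((n+1:Nat):Int) = (n:Int)+1 by push_cast; ring]
    rw [PySem.List.pyRange_one_succ_right (by positivity), List.foldl_append]
    have h1 : (PySem.List.pyRange 0 (n:Int) 1).foldl (fun mat i =>
        (PySem.List.pyRange 0 (m:Int) 1).foldl (fun mat _ =>
          PySem.List.pySetD mat i (PySem.List.pyGetD mat i [] ++ [0])) (mat ++ [([] : List Int)])) []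
        = pvZero n m := by
      have := ih
      unfold create_mat at this
      exact this
    rw [h1]
    simp only [List.foldl_cons, List.foldl_nil]
    rw [pv_row_fill m (pvZero n m) [] (n : Int) (by simp [pvZero])]
    simp [pvZero, List.range_succ]

lemma pvSd_succ (s1 s2 : List Char) (i0 j0 w : Int) (hw : 1 ≤ w) (x : Int) (hx : 0 ≤ x) :
    pvSd s1 s2 i0 j0 w (x+1) =
      if w ≤ x then
        pvSd s1 s2 i0 j0 w x + pvDelta s1 s2 (i0+x) (j0+x) - pvDelta s1 s2 (i0+x-w) (j0+x-w)
      else pvSd s1 s2 i0 j0 w x + pvDelta s1 s2 (i0+x) (j0+x) := by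
  unfold pvSd
  by_cases hxw : w ≤ x
  · rw [if_pos hxw]
    rw [max_eq_right (by omega : (0:Int) ≤ x + 1 - w), max_eq_right (by omega : (0:Int) ≤ x - w)]
    have hA1 : PySem.List.pyRange (x-w) (x+1) 1 = (x-w) :: PySem.List.pyRange (x-w+1) (x+1) 1 :=
      PySem.List.pyRange_one_cons (by omega)
    have hA2 : PySem.List.pyRange (x-w) (x+1) 1 = PySem.List.pyRange (x-w) x 1 ++ [x] :=
      PySem.List.pyRange_one_succ_right (by omega)
    have e1 := congrArg (fun l => (l.map (fun u => pvDelta s1 s2 (i0+u) (j0+u))).sum) hA1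
    have e2 := congrArg (fun l => (l.map (fun u => pvDelta s1 s2 (i0+u) (j0+u))).sum) hA2
    simp only [List.map_cons, List.sum_cons, List.map_append, List.sum_append,
      List.map_nil, List.sum_nil] at e1 e2
    have ee1 : i0 + (x - w) = i0 + x - w := by ring
    have ee2 : j0 + (x - w) = j0 + x - w := by ring
    rw [ee1, ee2] at e1
    rw [show x + 1 - w = x - w + 1 by ring]
    linarith [e1, e2]
  · rw [if_neg hxw]
    rw [max_eq_left (by omega), max_eq_left (by omega)]
    have hA2 : PySem.List.pyRange 0 (x+1) 1 = PySem.List.pyRange 0 x 1 ++ [x] :=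
      PySem.List.pyRange_one_succ_right (by omega)
    rw [hA2]
    simp

lemma Sd_eq_cnt (s1 s2 : List Char) (start i0 j0 t : Int) (hs : 0 ≤ start) (ht : 2*start ≤ t) :
    pvSd s1 s2 i0 j0 (2*start+1) (t+1)
      = pvCnt s1 s2 (i0 + t - 2*start) (j0 + t - 2*start) (2*start+1).toNat := by
  unfold pvSd pvCnt
  rw [show t + 1 - (2*start+1) = t - 2*start by ring]
  rw [max_eq_right (by omega : (0:Int) ≤ t - 2*start)]
  rw [PySem.List.pyRange_one]
  rw [show t + 1 - (t - 2*start) = 2*start+1 by ring]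
  rw [List.map_map]
  apply congrArg List.sum
  apply List.map_congr_left
  intro k _
  simp only [Function.comp_apply]
  rw [show i0 + (t - 2*start + (k:Int)) = i0 + t - 2*start + (k:Int) by ring,
      show j0 + (t - 2*start + (k:Int)) = j0 + t - 2*start + (k:Int) by ring]

lemma A_eq (seq1 seq2 : String) (window strin : Int) :
    extended_dotplot seq1 seq2 window strin
      = pvMarks (pvZero seq1.toList.length seq2.toList.length)
          (pvPsA seq1.toList seq2.toList strin (PySem.Int.truncdiv window 2)) := by
  unfold extended_dotplot pvPsA
  dsimp only
  rw [create_mat_eq]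
  refine (List.foldl_ext _ (fun mat i =>
      pvMarks mat (((PySem.List.pyRange (PySem.Int.truncdiv window 2)
          ((seq2.toList.length : Int) - PySem.Int.truncdiv window 2) 1).filter
        (fun j => pvCondA seq1.toList seq2.toList strin (PySem.Int.truncdiv window 2) i j)).map
        (fun (j : Int) => (i.toNat, j.toNat)))) _ ?_).trans (pv_foldl_marks _ _ _)
  intro mat i hi
  rw [PySem.List.mem_pyRange_one] at hi
  refine (List.foldl_ext _ (fun mat j =>
      if pvCondA seq1.toList seq2.toList strin (PySem.Int.truncdiv window 2) i j then
        pvMarkN mat i.toNat j.toNat else mat) _ ?_).trans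
      (pv_foldl_cmark _ (fun (_ : Int) => i.toNat) (fun (j : Int) => j.toNat) _ _)
  intro mat' j hj
  rw [PySem.List.mem_pyRange_one] at hj
  exact kloopA seq1.toList seq2.toList strin (PySem.Int.truncdiv window 2) i j mat'
    (fun hs => ⟨by omega, by omega⟩)

lemma bloop_gen (s1 s2 : List Char) (strin start i0 j0 : Int)
    (hs : 0 ≤ start) (hi0 : 0 ≤ i0) (hj0 : 0 ≤ j0) :
    ∀ (T : Nat) (mat : List (List Int)),
    ((PySem.List.pyRange 0 (T : Int) 1).foldl (fun (p : Int × List (List Int)) t =>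
      let s := p.1 + (if PySem.List.pyGetD s1 (i0 + t) ' ' = PySem.List.pyGetD s2 (j0 + t) ' ' then 1 else 0)
      let s := if 2*start+1 ≤ t then
          s - (if PySem.List.pyGetD s1 (i0 + t - (2*start+1)) ' ' = PySem.List.pyGetD s2 (j0 + t - (2*start+1)) ' ' then 1 else 0)
        else s
      let mat := if 2*start+1 - 1 ≤ t ∧ strin ≤ s then
          PySem.List.pySetD p.2 (i0 + t - start)
            (PySem.List.pySetD (PySem.List.pyGetD p.2 (i0 + t - start) []) (j0 + t - start) 1)
        else p.2
      (s, mat)) (0, mat))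
      = (pvSd s1 s2 i0 j0 (2*start+1) (T : Int),
         pvMarks mat (((PySem.List.pyRange 0 (T : Int) 1).filter
            (fun t => pvCondB s1 s2 strin start i0 j0 t)).map
            (fun t => ((i0 + t - start).toNat, (j0 + t - start).toNat)))) := by
  intro T
  induction T with
  | zero =>
    intro mat
    rw [show ((0:Nat):Int) = 0 by simp, PySem.List.pyRange_one_eq_nil le_rfl]
    simp only [List.foldl_nil, List.filter_nil, List.map_nil]
    have h0 : pvSd s1 s2 i0 j0 (2*start+1) 0 = 0 := by
      unfold pvSd
      rw [max_eq_left (by omega), PySem.List.pyRange_one_eq_nil le_rfl]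
      simp
    rw [h0]
    rfl
  | succ T ih =>
    intro mat
    rw [show ((T+1:Nat):Int) = (T:Int)+1 by push_cast; ring]
    rw [PySem.List.pyRange_one_succ_right (by positivity), List.foldl_append]
    rw [ih mat]
    simp only [List.foldl_cons, List.foldl_nil]
    try dsimp only
    have hsd := pvSd_succ s1 s2 i0 j0 (2*start+1) (by omega) (T:Int) (by positivity)
    have hstep : (if 2*start+1 ≤ (T:Int) then
          pvSd s1 s2 i0 j0 (2*start+1) (T:Int)
            + (if PySem.List.pyGetD s1 (i0 + (T:Int)) ' ' = PySem.List.pyGetD s2 (j0 + (T:Int)) ' ' then 1 else 0)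
            - (if PySem.List.pyGetD s1 (i0 + (T:Int) - (2*start+1)) ' ' = PySem.List.pyGetD s2 (j0 + (T:Int) - (2*start+1)) ' ' then 1 else 0)
        else pvSd s1 s2 i0 j0 (2*start+1) (T:Int)
            + (if PySem.List.pyGetD s1 (i0 + (T:Int)) ' ' = PySem.List.pyGetD s2 (j0 + (T:Int)) ' ' then 1 else 0))
        = pvSd s1 s2 i0 j0 (2*start+1) ((T:Int)+1) := by
      rw [hsd]
      simp only [pvDelta]
    rw [hstep]
    refine Prod.ext rfl ?_
    try dsimp only
    rw [List.filter_append, List.map_append]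
    unfold pvMarks
    rw [List.foldl_append]
    by_cases hc : ((2*start+1-1 : Int) ≤ (T:Int) ∧ strin ≤ pvSd s1 s2 i0 j0 (2*start+1) ((T:Int)+1))
    · rw [if_pos hc]
      have hcb : pvCondB s1 s2 strin start i0 j0 (T:Int) = true := by
        simp only [pvCondB, decide_eq_true_eq]
        exact ⟨by omega, hc.2⟩
      rw [show List.filter (fun t => pvCondB s1 s2 strin start i0 j0 t) [(T:Int)]
            = [(T:Int)] by simp [List.filter_cons, hcb]]
      simp only [List.map_cons, List.map_nil, List.foldl_cons, List.foldl_nil]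
      rw [pyMark_eq _ _ _ (by omega) (by omega)]
    · rw [if_neg hc]
      have hcb : pvCondB s1 s2 strin start i0 j0 (T:Int) = false := by
        simp only [pvCondB, decide_eq_false_iff_not]
        intro hh
        exact hc ⟨by omega, hh.2⟩
      rw [show List.filter (fun t => pvCondB s1 s2 strin start i0 j0 t) [(T:Int)]
            = [] by simp [List.filter_cons, hcb]]
      simp only [List.map_nil, List.foldl_nil]

lemma B_eq (seq1 seq2 : String) (window strin : Int) :
    extended_dotplot_alt seq1 seq2 window strin
      = if PySem.Int.truncdiv window 2 < 0 then pvZero seq1.toList.length seq2.toList.length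
        else pvMarks (pvZero seq1.toList.length seq2.toList.length)
          (pvPsB seq1.toList seq2.toList strin (PySem.Int.truncdiv window 2)) := by
  unfold extended_dotplot_alt
  dsimp only
  rw [show ((List.range seq1.toList.length).map
        (fun _ => List.replicate seq2.toList.length (0:Int)))
      = pvZero seq1.toList.length seq2.toList.length from rfl]
  by_cases hneg : PySem.Int.truncdiv window 2 < 0
  · rw [if_pos hneg, if_pos hneg]
  · rw [if_neg hneg, if_neg hneg]
    unfold pvPsB
    refine (List.foldl_ext _ (fun mat d =>
        pvMarks mat (((PySem.List.pyRange 0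
            (((min ((seq1.toList.length:Int) - max 0 (-d)) ((seq2.toList.length:Int) - (max 0 (-d) + d))).toNat : Nat) : Int) 1).filter
          (fun t => pvCondB seq1.toList seq2.toList strin (PySem.Int.truncdiv window 2) (max 0 (-d)) (max 0 (-d) + d) t)).map
          (fun t => ((max 0 (-d) + t - PySem.Int.truncdiv window 2).toNat,
                     (max 0 (-d) + d + t - PySem.Int.truncdiv window 2).toNat)))) _ ?_).trans
      (pv_foldl_marks _ _ _)
    intro mat d hd
    rw [PySem.List.mem_pyRange_one] at hd
    have hL : (0:Int) ≤ min ((seq1.toList.length:Int) - max 0 (-d)) ((seq2.toList.length:Int) - (max 0 (-d) + d)) := by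
      omega
    rw [show (min ((seq1.toList.length:Int) - max 0 (-d)) ((seq2.toList.length:Int) - (max 0 (-d) + d)))
          = (((min ((seq1.toList.length:Int) - max 0 (-d)) ((seq2.toList.length:Int) - (max 0 (-d) + d))).toNat : Nat) : Int)
        from (Int.toNat_of_nonneg hL).symm]
    exact congrArg Prod.snd
      (bloop_gen seq1.toList seq2.toList strin (PySem.Int.truncdiv window 2)
        (max 0 (-d)) (max 0 (-d) + d) (by omega) (by omega) (by omega)
        (min ((seq1.toList.length:Int) - max 0 (-d)) ((seq2.toList.length:Int) - (max 0 (-d) + d))).toNat mat)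

lemma mem_psA_iff (s1 s2 : List Char) (strin start : Int) (hs : 0 ≤ start) (p q : Nat) :
    ((p, q) ∈ pvPsA s1 s2 strin start) ↔
      (start ≤ (p:Int) ∧ (p:Int) < (s1.length : Int) - start ∧
       start ≤ (q:Int) ∧ (q:Int) < (s2.length : Int) - start ∧
       strin ≤ pvCnt s1 s2 ((p:Int) - start) ((q:Int) - start) (2*start+1).toNat) := by
  unfold pvPsA
  simp only [List.mem_flatMap, List.mem_map, List.mem_filter, PySem.List.mem_pyRange_one,
    pvCondA, decide_eq_true_eq, Prod.mk.injEq]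
  constructor
  · rintro ⟨i, ⟨hi1, hi2⟩, j, ⟨⟨hj1, hj2⟩, _, hcnt⟩, hip, hjq⟩
    have hip' : (p:Int) = i := by omega
    have hjq' : (q:Int) = j := by omega
    rw [hip', hjq']
    exact ⟨hi1, hi2, hj1, hj2, hcnt⟩
  · rintro ⟨h1, h2, h3, h4, h5⟩
    exact ⟨(p:Int), ⟨h1, h2⟩, (q:Int), ⟨⟨h3, h4⟩, ⟨by omega, h5⟩⟩, by simp, by simp⟩

lemma mem_psB_iff (s1 s2 : List Char) (strin start : Int) (hs : 0 ≤ start) (p q : Nat) :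
    ((p, q) ∈ pvPsB s1 s2 strin start) ↔
      (start ≤ (p:Int) ∧ (p:Int) < (s1.length : Int) - start ∧
       start ≤ (q:Int) ∧ (q:Int) < (s2.length : Int) - start ∧
       strin ≤ pvCnt s1 s2 ((p:Int) - start) ((q:Int) - start) (2*start+1).toNat) := by
  unfold pvPsB
  simp only [List.mem_flatMap, List.mem_map, List.mem_filter, PySem.List.mem_pyRange_one,
    pvCondB, decide_eq_true_eq, Prod.mk.injEq]
  constructor
  · rintro ⟨d, ⟨hd1, hd2⟩, t, ⟨⟨ht1, ht2⟩, ⟨htw, hsd⟩⟩, hpe, hqe⟩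
    have hi0 : (0:Int) ≤ max 0 (-d) := le_max_left _ _
    have hj0 : (0:Int) ≤ max 0 (-d) + d := by omega
    rw [Sd_eq_cnt s1 s2 start _ _ t hs htw] at hsd
    have hp' : (p:Int) = max 0 (-d) + t - start := by omega
    have hq' : (q:Int) = max 0 (-d) + d + t - start := by omega
    refine ⟨by omega, by omega, by omega, by omega, ?_⟩
    rw [show (p:Int) - start = max 0 (-d) + t - 2*start by omega,
        show (q:Int) - start = max 0 (-d) + d + t - 2*start by omega]
    exact hsd
  · rintro ⟨h1, h2, h3, h4, h5⟩
    refine ⟨(q:Int) - (p:Int), ⟨by omega, by omega⟩,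
      (p:Int) - max 0 (-((q:Int) - (p:Int))) + start,
      ⟨⟨by omega, by omega⟩, ⟨by omega, ?_⟩⟩, by omega, by omega⟩
    rw [Sd_eq_cnt s1 s2 start _ _ _ hs (by omega)]
    rw [show max 0 (-((q:Int) - (p:Int))) + ((p:Int) - max 0 (-((q:Int) - (p:Int))) + start) - 2*start
          = (p:Int) - start by ring]
    rw [show max 0 (-((q:Int) - (p:Int))) + ((q:Int) - (p:Int))
            + ((p:Int) - max 0 (-((q:Int) - (p:Int))) + start) - 2*start
          = (q:Int) - start by ring]
    exact h5

-- ===== VERDICT (by name: the statement is the Claim_ definition above) =====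
theorem extended_dotplot_spec : Claim_equal_extended_dotplot := by
  intro seq1 seq2 window strin _
  unfold Spec_extended_dotplot
  rw [A_eq, B_eq]
  by_cases hs : PySem.Int.truncdiv window 2 < 0
  · rw [if_pos hs, psA_nil_of_neg _ _ _ _ hs]; rfl
  · rw [if_neg hs]
    rw [not_lt] at hs
    have hbA : ∀ pr ∈ pvPsA seq1.toList seq2.toList strin (PySem.Int.truncdiv window 2),
        pr.1 < seq1.toList.length ∧ pr.2 < seq2.toList.length := by
      rintro ⟨p, q⟩ hpr
      rw [mem_psA_iff _ _ _ _ hs] at hpr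
      constructor <;> omega
    have hbB : ∀ pr ∈ pvPsB seq1.toList seq2.toList strin (PySem.Int.truncdiv window 2),
        pr.1 < seq1.toList.length ∧ pr.2 < seq2.toList.length := by
      rintro ⟨p, q⟩ hpr
      rw [mem_psB_iff _ _ _ _ hs] at hpr
      constructor <;> omega
    obtain ⟨hshA, hentA⟩ := pv_ent_marks seq1.toList.length seq2.toList.length _ _
      (pv_shape_zero _ _) hbA
    obtain ⟨hshB, hentB⟩ := pv_ent_marks seq1.toList.length seq2.toList.length _ _
      (pv_shape_zero _ _) hbB
    refine pv_matrix_ext _ _ _ _ hshA hshB ?_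
    intro p q hp hq
    rw [hentA p q hp hq, hentB p q hp hq]
    have : ((p, q) ∈ pvPsA seq1.toList seq2.toList strin (PySem.Int.truncdiv window 2)) ↔
        ((p, q) ∈ pvPsB seq1.toList seq2.toList strin (PySem.Int.truncdiv window 2)) := by
      rw [mem_psA_iff _ _ _ _ hs, mem_psB_iff _ _ _ _ hs]
    split_ifs with h1 h2 h2 <;> first | rfl | (exact absurd (this.mp h1) h2) | (exact absurd (this.mpr h2) h1)
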